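-- pv_equiv track=rewrite | github.com/pypi-data/pypi-mirror-107 | packages/stringcompare/stringcompare-0.1.7.tar.gz/stringcompare-0.1.7/stringcompare/hashing_search.py | hashing_search
-- ===== SOURCE A (Python) =====
-- def hashing_search(fstring: str, sstring: str) -> bool:
--     def factors_generation(string: str) -> list:
--         factors = [1]
--
--         for i in range(1, len(string)):
--             factor = factors[i - 1] * 2
--             factors.append(factor)
--         return factors
--
--     def hash_generation(string, degree: list) -> list:
--         hashs = [ord(string[0])]
--
--         for i in range(1, len(fstring)):
--             symb_hash = hashs[i - 1] + degree[i] * ord(string[i])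
--             hashs.append(symb_hash)
--         return hashs
--
--     if len(fstring) == len(sstring) and len(fstring) > 0:
--         factors = factors_generation(sstring)
--         fhashs = hash_generation(fstring, factors)
--         shashs = hash_generation(sstring, factors)
--         if fhashs[-1] == shashs[-1]:
--             return True
--         else:
--             return False
--     else:
--         return False
-- ===== SOURCE B (Python) =====
-- def hashing_search(fstring: str, sstring: str) -> bool:
--     if len(fstring) != len(sstring) or len(fstring) == 0:
--         return False
--
--     def horner(s: str) -> int:
--         h = 0
--         for c in reversed(s):
--             h = h * 2 + ord(c)
--         return h
--
--     return horner(fstring) == horner(sstring)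
-- ===== Notes on version B (the rewrite author's own statement) =====
-- stated objective: simpler
-- what changed: Replaces A's power table plus two prefix-hash lists with a single reverse-order Horner multiply-accumulate per string (h = h*2 + ord(c)), building no lists at all.
import Mathlib
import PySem

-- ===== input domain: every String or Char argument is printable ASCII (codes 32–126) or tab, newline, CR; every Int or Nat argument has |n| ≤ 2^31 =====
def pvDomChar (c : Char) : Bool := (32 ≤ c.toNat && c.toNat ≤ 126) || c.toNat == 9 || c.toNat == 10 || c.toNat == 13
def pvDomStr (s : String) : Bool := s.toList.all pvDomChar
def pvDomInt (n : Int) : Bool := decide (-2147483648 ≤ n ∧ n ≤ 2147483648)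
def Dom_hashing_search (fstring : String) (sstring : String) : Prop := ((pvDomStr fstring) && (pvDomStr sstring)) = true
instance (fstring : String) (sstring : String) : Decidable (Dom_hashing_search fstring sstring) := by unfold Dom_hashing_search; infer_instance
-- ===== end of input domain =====

-- B replaces A's power table and prefix-hash lists with a single reverse-order Horner fold per string (simpler, no lists).


-- ===== PORT A =====
-- literal port; the inner defs factors_generation / hash_generation become top-level helpers
-- (hash_generation closes over len(fstring), passed here as flen)
def pvFactorsGen (string : List Char) : List Int :=
  (PySem.List.pyRange 1 (string.length : Int) 1).foldl
    (fun factors i => factors ++ [PySem.List.pyGetD factors (i - 1) 0 * 2]) [1]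

def pvHashGen (flen : Nat) (string : List Char) (degree : List Int) : List Int :=
  (PySem.List.pyRange 1 (flen : Int) 1).foldl
    (fun hashs i => hashs ++ [PySem.List.pyGetD hashs (i - 1) 0 +
        PySem.List.pyGetD degree i 0 * ((PySem.List.pyGetD string i ' ').toNat : Int)])
    [((PySem.List.pyGetD string 0 ' ').toNat : Int)]

def hashing_search (fstring : String) (sstring : String) : Bool :=
  if fstring.toList.length = sstring.toList.length ∧ 0 < fstring.toList.length then
    let factors := pvFactorsGen sstring.toList
    let fhashs := pvHashGen fstring.toList.length fstring.toList factors
    let shashs := pvHashGen fstring.toList.length sstring.toList factors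
    if PySem.List.pyGetD fhashs (-1) 0 = PySem.List.pyGetD shashs (-1) 0 then true else false
  else
    false

-- ===== PORT B =====
-- h = 0; for c in reversed(s): h = h*2 + ord(c)
def pvHorner (cs : List Char) : Int :=
  cs.reverse.foldl (fun h c => h * 2 + (c.toNat : Int)) 0

def hashing_search_alt (fstring : String) (sstring : String) : Bool :=
  if fstring.toList.length ≠ sstring.toList.length ∨ fstring.toList.length = 0 then false
  else decide (pvHorner fstring.toList = pvHorner sstring.toList)

-- ===== PRECONDITION & SPEC =====
def Spec_hashing_search (fstring : String) (sstring : String) (out : Bool) : Prop := out = hashing_search_alt fstring sstring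
instance (fstring : String) (sstring : String) (out : Bool) : Decidable (Spec_hashing_search fstring sstring out) := by unfold Spec_hashing_search; infer_instance

-- ===== CLAIM (what is proved, stated in full; the proofs are below) =====
def Claim_equal_hashing_search : Prop := ∀ (fstring : String) (sstring : String), Dom_hashing_search fstring sstring → Spec_hashing_search fstring sstring (hashing_search fstring sstring)

-- ===== LEMMAS AND PROOFS =====

/-- the factors table is the power table: factors[j] = 2^j -/
def pvPow (N : Nat) : List Int := (List.range N).map (fun j => (2 : Int) ^ j)

/-- weighted prefix sum: hashs[m-1] = sum_{i<m} 2^i * ord cs[i] -/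
def pvSum (cs : List Char) (m : Nat) : Int :=
  ((List.range m).map (fun i => (2 : Int) ^ i * ((cs.getD i ' ').toNat : Int))).sum

theorem pv_sum_map_two_mul (f : Nat → Int) (l : List Nat) :
    (l.map (fun i => 2 * f i)).sum = 2 * (l.map f).sum := by
  induction l with
  | nil => simp
  | cons a t ih => simp [ih]; ring

theorem pv_factors_fold (n : Nat) :
    (PySem.List.pyRange 1 ((n + 1 : Nat) : Int) 1).foldl
      (fun factors i => factors ++ [PySem.List.pyGetD factors (i - 1) 0 * 2]) [1]
      = pvPow (n + 1) := by
  induction n with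
  | zero => simp [pvPow, PySem.List.pyRange_one_eq_nil]
  | succ n ih =>
      have h : PySem.List.pyRange 1 ((n + 2 : Nat) : Int) 1
          = PySem.List.pyRange 1 ((n + 1 : Nat) : Int) 1 ++ [((n + 1 : Nat) : Int)] := by
        have := PySem.List.pyRange_one_succ_right (a := 1) (b := ((n + 1 : Nat) : Int))
          (by push_cast; omega)
        simpa [show ((n + 2 : Nat) : Int) = ((n + 1 : Nat) : Int) + 1 by push_cast; ring] using this
      rw [h, List.foldl_append, ih]
      simp only [List.foldl_cons, List.foldl_nil]
      have hget : PySem.List.pyGetD (pvPow (n + 1)) (((n + 1 : Nat) : Int) - 1) 0 = (2 : Int) ^ n := by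
        have : ((n + 1 : Nat) : Int) - 1 = (n : Int) := by push_cast; ring
        rw [this, PySem.List.pyGetD_natCast]
        simp [pvPow, List.getD]
      rw [hget]
      simp [pvPow, List.range_succ, pow_succ]

theorem pv_factors_eq (cs : List Char) (h1 : 1 ≤ cs.length) :
    pvFactorsGen cs = pvPow cs.length := by
  obtain ⟨n, hn⟩ : ∃ n, cs.length = n + 1 := ⟨cs.length - 1, by omega⟩
  unfold pvFactorsGen
  rw [hn]
  exact pv_factors_fold n

theorem pv_hash_fold (cs : List Char) (N : Nat) (n : Nat) (hn : n + 1 ≤ N) :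
    (PySem.List.pyRange 1 ((n + 1 : Nat) : Int) 1).foldl
      (fun hashs i => hashs ++ [PySem.List.pyGetD hashs (i - 1) 0 +
          PySem.List.pyGetD (pvPow N) i 0 * ((PySem.List.pyGetD cs i ' ').toNat : Int)])
      [((PySem.List.pyGetD cs 0 ' ').toNat : Int)]
      = (List.range (n + 1)).map (fun j => pvSum cs (j + 1)) := by
  induction n with
  | zero =>
      simp [PySem.List.pyRange_one_eq_nil, pvSum, List.range_succ,
        PySem.List.pyGetD_zero, List.getD]
  | succ n ih =>
      have h : PySem.List.pyRange 1 ((n + 2 : Nat) : Int) 1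
          = PySem.List.pyRange 1 ((n + 1 : Nat) : Int) 1 ++ [((n + 1 : Nat) : Int)] := by
        have := PySem.List.pyRange_one_succ_right (a := 1) (b := ((n + 1 : Nat) : Int))
          (by push_cast; omega)
        simpa [show ((n + 2 : Nat) : Int) = ((n + 1 : Nat) : Int) + 1 by push_cast; ring] using this
      rw [h, List.foldl_append, ih (by omega)]
      simp only [List.foldl_cons, List.foldl_nil]
      have hprev : PySem.List.pyGetD ((List.range (n + 1)).map (fun j => pvSum cs (j + 1)))
          (((n + 1 : Nat) : Int) - 1) 0 = pvSum cs (n + 1) := by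
        have : ((n + 1 : Nat) : Int) - 1 = (n : Int) := by push_cast; ring
        rw [this, PySem.List.pyGetD_natCast]
        simp [List.getD]
      have hpow : PySem.List.pyGetD (pvPow N) ((n + 1 : Nat) : Int) 0 = (2 : Int) ^ (n + 1) := by
        rw [PySem.List.pyGetD_natCast]
        simp [pvPow, List.getD, Nat.lt_of_succ_le hn]
      rw [hprev, hpow]
      have hsum : pvSum cs (n + 1) + (2 : Int) ^ (n + 1) *
          ((PySem.List.pyGetD cs ((n + 1 : Nat) : Int) ' ').toNat : Int) = pvSum cs (n + 2) := by
        rw [PySem.List.pyGetD_natCast]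
        simp [pvSum, List.range_succ]
        ring
      rw [hsum]
      simp [List.range_succ]

theorem pv_sum_cons (c : Char) (t : List Char) (m : Nat) :
    pvSum (c :: t) (m + 1) = (c.toNat : Int) + 2 * pvSum t m := by
  simp only [pvSum, List.range_succ_eq_map, List.map_cons, List.map_map, List.sum_cons,
    Function.comp_def, pow_succ, List.getD_cons_zero, List.getD_cons_succ, pow_zero, one_mul]
  rw [show (fun i => (2:Int) ^ i * 2 * ((t.getD i ' ').toNat : Int))
      = (fun i => 2 * ((2:Int) ^ i * ((t.getD i ' ').toNat : Int))) from funext (fun i => by ring)]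
  rw [pv_sum_map_two_mul]

theorem pv_horner_eq_sum (cs : List Char) : pvHorner cs = pvSum cs cs.length := by
  unfold pvHorner
  rw [List.foldl_reverse]
  induction cs with
  | nil => simp [pvSum]
  | cons c t ih =>
      simp only [List.foldr_cons, ih, List.length_cons]
      rw [pv_sum_cons]
      ring

theorem pv_last_hash (flen : Nat) (cs : List Char) (N : Nat)
    (hflen : flen = N) (h1 : 1 ≤ N) :
    PySem.List.pyGetD (pvHashGen flen cs (pvPow N)) (-1) 0 = pvSum cs N := by
  obtain ⟨n, rfl⟩ : ∃ n, N = n + 1 := ⟨N - 1, by omega⟩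
  unfold pvHashGen
  rw [hflen, pv_hash_fold cs (n + 1) n (le_refl _)]
  rw [List.range_succ, List.map_append]
  simpa using PySem.List.pyGetD_neg_one_append_singleton ((List.range n).map (fun j => pvSum cs (j + 1))) (pvSum cs (n + 1)) 0

-- ===== VERDICT (by name: the statement is the Claim_ definition above) =====
theorem hashing_search_spec : Claim_equal_hashing_search := by
  intro fstring sstring _
  unfold Spec_hashing_search hashing_search hashing_search_alt
  by_cases h : fstring.toList.length = sstring.toList.length ∧ 0 < fstring.toList.length
  · obtain ⟨heq, hpos⟩ := h
    rw [if_pos ⟨heq, hpos⟩]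
    rw [if_neg (show ¬(fstring.toList.length ≠ sstring.toList.length ∨ fstring.toList.length = 0) by omega)]
    show (if PySem.List.pyGetD (pvHashGen fstring.toList.length fstring.toList (pvFactorsGen sstring.toList)) (-1) 0 =
            PySem.List.pyGetD (pvHashGen fstring.toList.length sstring.toList (pvFactorsGen sstring.toList)) (-1) 0
          then true else false) = _
    rw [show pvFactorsGen sstring.toList = pvPow fstring.toList.length by
      rw [pv_factors_eq sstring.toList (by omega)]; rw [heq]]
    rw [pv_last_hash _ fstring.toList fstring.toList.length rfl (by omega),
        pv_last_hash _ sstring.toList fstring.toList.length rfl (by omega)]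
    rw [pv_horner_eq_sum, pv_horner_eq_sum, heq]
    by_cases hv : pvSum fstring.toList sstring.toList.length = pvSum sstring.toList sstring.toList.length <;>
      simp [hv]
  · rw [if_neg h, if_pos (by omega)]
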